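-- pv_equiv track=rewrite | github.com/cellarium-ai/CellMincer | cellmincer/opto_denoise.py | get_unet_input_size
-- ===== SOURCE A (Python) =====
-- def get_unet_input_size(
--     output_min_size: int,
--     kernel_size: int,
--     n_conv_layers: int,
--     depth: int):
--     """Smallest input size for output size >= `output_min_size`.
--
--     .. note:
--         The calculated input sizes guarantee that all of the layers have even dimensions.
--         This is important to prevent aliasing in downsampling (pooling) operations.
--
--     """
--     delta = n_conv_layers * (kernel_size - 1)
--     pad = delta * sum([2 ** i for i in range(depth)])
--     ds = 2 ** depth
--     res = (output_min_size + pad) % ds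
--     bottom_size = (output_min_size + pad) // ds + res
--     input_size = bottom_size
--     for i in range(depth):
--         input_size = 2 * (input_size + delta)
--     input_size += delta
--     return input_size
-- ===== SOURCE B (Python) =====
-- def get_unet_input_size(
--     output_min_size: int,
--     kernel_size: int,
--     n_conv_layers: int,
--     depth: int):
--     """Closed-form version: the depth-loop doubling recurrence and the
--     geometric sum are replaced by single arithmetic expressions."""
--     delta = n_conv_layers * (kernel_size - 1)
--     ds = 2 ** depth
--     pad = delta * (ds - 1)
--     total = output_min_size + pad
--     bottom_size = total // ds + total % ds
--     return ds * bottom_size + delta * (2 * ds - 2) + delta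
-- ===== Notes on version B (the rewrite author's own statement) =====
-- stated objective: faster
-- what changed: The geometric sum over range(depth) and the depth-iteration doubling loop are both replaced by closed-form arithmetic: pad = delta*(2**depth-1) and input_size = 2**depth*bottom_size + delta*(2**(depth+1)-2) + delta.
-- outside the precondition, e.g. on get_unet_input_size(10, 3, 2, -1): A returns 24.0, B returns 8.0
import Mathlib
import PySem

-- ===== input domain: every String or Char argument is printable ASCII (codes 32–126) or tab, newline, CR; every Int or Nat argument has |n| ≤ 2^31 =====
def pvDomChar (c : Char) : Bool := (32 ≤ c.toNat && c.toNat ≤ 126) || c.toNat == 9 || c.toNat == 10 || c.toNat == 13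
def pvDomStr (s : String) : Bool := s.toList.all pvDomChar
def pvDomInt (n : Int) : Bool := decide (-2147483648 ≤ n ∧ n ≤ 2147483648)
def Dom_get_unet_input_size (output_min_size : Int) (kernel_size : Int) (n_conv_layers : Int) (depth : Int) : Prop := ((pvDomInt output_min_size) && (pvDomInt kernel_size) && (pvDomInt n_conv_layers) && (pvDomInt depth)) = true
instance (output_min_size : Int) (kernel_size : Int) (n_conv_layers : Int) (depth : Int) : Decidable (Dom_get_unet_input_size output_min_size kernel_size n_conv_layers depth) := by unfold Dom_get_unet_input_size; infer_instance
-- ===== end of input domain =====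

-- B replaces A's geometric sum and its depth-iteration doubling loop by closed-form arithmetic (objective: simpler).

-- ===== PORT A =====
-- `2 ** e` on a nonnegative int exponent is exactly `(2:Int) ^ e.toNat`; Pre_ restricts to depth ≥ 0
-- (for negative depth Python's `2 ** depth` is a float and A returns a float, not an int).
def get_unet_input_size (output_min_size : Int) (kernel_size : Int) (n_conv_layers : Int) (depth : Int) : Int :=
  let delta := n_conv_layers * (kernel_size - 1)
  let pad := delta * (((PySem.List.pyRange 0 depth 1).map (fun i => (2:Int) ^ i.toNat)).sum)
  let ds := (2:Int) ^ depth.toNat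
  let res := PySem.Int.mod (output_min_size + pad) ds
  let bottom_size := PySem.Int.floordiv (output_min_size + pad) ds + res
  let input_size := (PySem.List.pyRange 0 depth 1).foldl (fun s _ => 2 * (s + delta)) bottom_size
  input_size + delta

-- ===== PORT B =====
def get_unet_input_size_alt (output_min_size : Int) (kernel_size : Int) (n_conv_layers : Int) (depth : Int) : Int :=
  let delta := n_conv_layers * (kernel_size - 1)
  let ds := (2:Int) ^ depth.toNat
  let pad := delta * (ds - 1)
  let total := output_min_size + pad
  let bottom_size := PySem.Int.floordiv total ds + PySem.Int.mod total ds
  ds * bottom_size + delta * (2 * ds - 2) + delta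

-- ===== PRECONDITION & SPEC =====
-- Pre_ excludes depth < 0, where Python's 2 ** depth is a float and A returns a float instead of an int.
def Pre_get_unet_input_size (output_min_size : Int) (kernel_size : Int) (n_conv_layers : Int) (depth : Int) : Prop := 0 ≤ depth
instance (output_min_size : Int) (kernel_size : Int) (n_conv_layers : Int) (depth : Int) : Decidable (Pre_get_unet_input_size output_min_size kernel_size n_conv_layers depth) := by unfold Pre_get_unet_input_size; infer_instance
def pvWitness_get_unet_input_size : Int × Int × Int × Int := (10, 3, 2, 3)

def Spec_get_unet_input_size (output_min_size : Int) (kernel_size : Int) (n_conv_layers : Int) (depth : Int) (out : Int) : Prop := out = get_unet_input_size_alt output_min_size kernel_size n_conv_layers depth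
instance (output_min_size : Int) (kernel_size : Int) (n_conv_layers : Int) (depth : Int) (out : Int) : Decidable (Spec_get_unet_input_size output_min_size kernel_size n_conv_layers depth out) := by unfold Spec_get_unet_input_size; infer_instance

-- ===== CLAIM (what is proved, stated in full; the proofs are below) =====
def Claim_equal_get_unet_input_size : Prop := ∀ (output_min_size : Int) (kernel_size : Int) (n_conv_layers : Int) (depth : Int), Dom_get_unet_input_size output_min_size kernel_size n_conv_layers depth → Pre_get_unet_input_size output_min_size kernel_size n_conv_layers depth → Spec_get_unet_input_size output_min_size kernel_size n_conv_layers depth (get_unet_input_size output_min_size kernel_size n_conv_layers depth)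

-- ===== LEMMAS AND PROOFS =====

theorem pv_sum_pow (m : Nat) : ((List.range m).map (fun k => (2:Int) ^ k)).sum = 2 ^ m - 1 := by
  induction m with
  | zero => simp
  | succ n ih => simp [List.range_succ, ih, pow_succ]; ring

theorem pv_sum_pyRange (d : Int) :
    ((PySem.List.pyRange 0 d 1).map (fun i => (2:Int) ^ i.toNat)).sum = 2 ^ d.toNat - 1 := by
  rw [PySem.List.pyRange_one]
  rw [List.map_map]
  have : ((fun i : Int => (2:Int) ^ i.toNat) ∘ fun k : Nat => (0:Int) + k) = fun k : Nat => (2:Int) ^ k := by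
    funext k; simp
  rw [this]
  simpa using pv_sum_pow (d - 0).toNat

theorem pv_foldl_double (delta : Int) : ∀ (l : List Int) (b : Int),
    l.foldl (fun s _ => 2 * (s + delta)) b = 2 ^ l.length * b + delta * (2 ^ (l.length + 1) - 2) := by
  intro l
  induction l with
  | nil => intro b; simp
  | cons a t ih =>
    intro b
    simp only [List.foldl_cons, ih, List.length_cons]
    ring

-- ===== VERDICT (by name: the statement is the Claim_ definition above) =====
theorem get_unet_input_size_spec : Claim_equal_get_unet_input_size := by
  intro o k n d _ _
  unfold Spec_get_unet_input_size get_unet_input_size get_unet_input_size_alt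
  simp only [pv_sum_pyRange, pv_foldl_double, PySem.List.length_pyRange_one]
  have : (d - 0).toNat = d.toNat := by omega
  rw [this]
  ring
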